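-- pv_equiv track=rewrite | github.com/project-chip/certification-tool-backend | test_collections/matter/sdk_tests/support/performance_tests/utils.py | compute_state
-- ===== SOURCE A (Python) =====
-- def compute_state(execution_status: list) -> str:
--     if any(tc for tc in execution_status if tc == "CANCELLED"):
--         return "FAIL"
--
--     if any(tc for tc in execution_status if tc == "ERROR"):
--         return "FAIL"
--
--     if any(tc for tc in execution_status if tc == "FAIL"):
--         return "FAIL"
--
--     if any(tc for tc in execution_status if tc == "PENDING"):
--         return "FAIL"
--
--     return "PASS"
-- ===== SOURCE B (Python) =====
-- _BAD = {"CANCELLED", "ERROR", "FAIL", "PENDING"}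
--
-- def compute_state(execution_status: list) -> str:
--     return "FAIL" if any(tc in _BAD for tc in execution_status) else "PASS"
-- ===== Notes on version B (the rewrite author's own statement) =====
-- stated objective: simpler
-- what changed: Four separate any-scans (one per bad status) collapsed into a single pass testing membership in one sentinel set of bad statuses.
import Mathlib
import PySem

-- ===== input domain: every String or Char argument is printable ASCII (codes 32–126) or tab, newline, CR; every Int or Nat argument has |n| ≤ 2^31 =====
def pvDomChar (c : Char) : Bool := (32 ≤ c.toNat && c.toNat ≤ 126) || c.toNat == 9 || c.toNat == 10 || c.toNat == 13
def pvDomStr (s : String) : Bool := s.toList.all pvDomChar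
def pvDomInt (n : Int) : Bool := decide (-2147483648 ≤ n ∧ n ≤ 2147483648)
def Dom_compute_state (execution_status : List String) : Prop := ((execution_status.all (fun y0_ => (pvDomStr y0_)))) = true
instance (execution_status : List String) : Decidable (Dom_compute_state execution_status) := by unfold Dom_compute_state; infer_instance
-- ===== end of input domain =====

-- B collapses A's four separate any-scans into one pass testing membership in a single bad-status set (objective: simpler).


-- ===== PORT A =====
-- Four successive scans, each 'any(tc for tc in … if tc == <status>)'; a matching tc is a
-- non-empty string, hence truthy, so each any reduces to an existence test for that status.
def compute_state (execution_status : List String) : String :=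
  if execution_status.any (fun tc => tc == "CANCELLED") then "FAIL"
  else if execution_status.any (fun tc => tc == "ERROR") then "FAIL"
  else if execution_status.any (fun tc => tc == "FAIL") then "FAIL"
  else if execution_status.any (fun tc => tc == "PENDING") then "FAIL"
  else "PASS"

-- ===== PORT B =====
-- The sentinel set of bad statuses (Python set literal → PySem.Set)
def badStatuses : PySem.Set String :=
  PySem.Set.ofList ["CANCELLED", "ERROR", "FAIL", "PENDING"]

def compute_state_alt (execution_status : List String) : String :=
  if execution_status.any (fun tc => badStatuses.contains tc) then "FAIL" else "PASS"

-- ===== PRECONDITION & SPEC =====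
def Spec_compute_state (execution_status : List String) (out : String) : Prop := out = compute_state_alt execution_status
instance (execution_status : List String) (out : String) : Decidable (Spec_compute_state execution_status out) := by unfold Spec_compute_state; infer_instance

-- ===== CLAIM (what is proved, stated in full; the proofs are below) =====
def Claim_equal_compute_state : Prop := ∀ (execution_status : List String), Dom_compute_state execution_status → Spec_compute_state execution_status (compute_state execution_status)

-- ===== LEMMAS AND PROOFS =====
theorem badStatuses_eq : badStatuses = ["CANCELLED", "ERROR", "FAIL", "PENDING"] := by decide

theorem contains_bad (x : String) :
    badStatuses.contains x
      = ((x == "CANCELLED") || (x == "ERROR") || (x == "FAIL") || (x == "PENDING")) := by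
  rw [badStatuses_eq]
  simp only [PySem.Set.contains, List.contains_cons, List.contains_nil, Bool.or_false,
    Bool.or_assoc]

theorem any_or4 (l : List String) (p q r s : String → Bool) :
    l.any (fun x => p x || q x || r x || s x)
      = (l.any p || l.any q || l.any r || l.any s) := by
  induction l with
  | nil => rfl
  | cons x xs ih =>
    simp only [List.any_cons, ih]
    generalize p x = a; generalize q x = b; generalize r x = c; generalize s x = d
    generalize xs.any p = e; generalize xs.any q = f; generalize xs.any r = g
    generalize xs.any s = h
    cases a <;> cases b <;> cases c <;> cases d <;> cases e <;> cases f <;> cases g <;>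
      cases h <;> rfl

theorem compute_state_eq_alt (l : List String) : compute_state l = compute_state_alt l := by
  simp only [compute_state, compute_state_alt, contains_bad, any_or4]
  cases l.any (fun tc => tc == "CANCELLED") <;> cases l.any (fun tc => tc == "ERROR") <;>
    cases l.any (fun tc => tc == "FAIL") <;> cases l.any (fun tc => tc == "PENDING") <;> rfl

-- ===== VERDICT (by name: the statement is the Claim_ definition above) =====
theorem compute_state_spec : Claim_equal_compute_state := by
  intro l _
  exact compute_state_eq_alt l
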